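-- pv_equiv track=rewrite | github.com/mefferso/gfs-250mb | scripts/build_raob_250mb_dataset.py | _first_present
-- ===== SOURCE A (Python) =====
-- from typing import Dict, List, Optional, Tuple
--
-- def _norm_key(s: str) -> str:
--     return (s or "").strip().lower()
--
-- def _first_present(row: dict, keys: List[str]) -> Optional[str]:
--     lk = {_norm_key(k): k for k in row.keys()}
--     for want in keys:
--         actual = lk.get(_norm_key(want))
--         if actual is not None:
--             v = row.get(actual)
--             if v is None:
--                 continue
--             v = str(v).strip()
--             if v != "":
--                 return v
--     return None
-- ===== SOURCE B (Python) =====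
-- from typing import Dict, List, Optional, Tuple
--
-- def _norm_key(s: str) -> str:
--     return (s or "").strip().lower()
--
-- def _first_present(row: dict, keys: List[str]) -> Optional[str]:
--     # Rank each normalized wanted key by its first position in `keys`,
--     # then sweep the row once, slotting each value into its rank.
--     rank: Dict[str, int] = {}
--     for i, want in enumerate(keys):
--         nk = _norm_key(want)
--         if nk not in rank:
--             rank[nk] = i
--     best: List[Optional[str]] = [None] * len(keys)
--     for k, v in row.items():
--         i = rank.get(_norm_key(k))
--         if i is not None:
--             best[i] = v
--     for v in best:
--         if v is not None:
--             v = str(v).strip()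
--             if v:
--                 return v
--     return None
-- ===== Notes on version B (the rewrite author's own statement) =====
-- stated objective: alternative
-- what changed: B inverts A's lookup direction: instead of building a normalized-key->row-key index and probing it per wanted key (with a second lookup back into the row), B ranks each normalized wanted key by its first position in keys, sweeps the row once slotting each value into its rank, then returns the first slot whose value strips non-empty.
import Mathlib
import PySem

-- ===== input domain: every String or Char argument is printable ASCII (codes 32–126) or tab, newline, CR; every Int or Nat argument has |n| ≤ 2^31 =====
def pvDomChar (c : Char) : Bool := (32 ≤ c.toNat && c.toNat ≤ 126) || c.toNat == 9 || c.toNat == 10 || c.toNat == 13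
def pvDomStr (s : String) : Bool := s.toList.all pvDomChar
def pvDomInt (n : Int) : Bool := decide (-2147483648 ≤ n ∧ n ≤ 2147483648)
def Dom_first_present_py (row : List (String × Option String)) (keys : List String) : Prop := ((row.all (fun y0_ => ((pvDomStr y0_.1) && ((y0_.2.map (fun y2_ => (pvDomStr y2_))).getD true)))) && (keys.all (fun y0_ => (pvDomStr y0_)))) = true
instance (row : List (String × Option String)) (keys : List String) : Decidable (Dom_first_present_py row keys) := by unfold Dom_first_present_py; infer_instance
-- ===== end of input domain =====

-- B inverts the lookup direction: it ranks normalized wanted keys by first position, sweeps the row once into a slot array, and returns the first non-empty slot (alternative decomposition, same results).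


-- ===== PORT A =====
-- _norm_key: (s or "").strip().lower() — for a str argument, "s or ''" is s itself ('' stays '')
def pvNormKey (s : String) : String := PySem.Str.lower (PySem.Str.strip s)

-- the loop 'for want in keys: …' of A, with the prebuilt index lk
def pvLoopA (lk : PySem.Dict String String) (row : PySem.Dict String (Option String)) :
    List String → Option String
  | [] => none
  | want :: rest =>
    match lk.get? (pvNormKey want) with
    | none => pvLoopA lk row rest
    | some actual =>
      match row.getD actual none with      -- v = row.get(actual); default None
      | none => pvLoopA lk row rest        -- if v is None: continue
      | some v =>
        let v' := PySem.Str.strip v        -- v = str(v).strip()  (v is already a str)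
        if v' ≠ "" then some v' else pvLoopA lk row rest

def first_present_py (row : List (String × Option String)) (keys : List String) : Option String :=
  let d : PySem.Dict String (Option String) := PySem.Dict.ofList row
  let lk : PySem.Dict String String :=
    d.keys.foldl (fun acc k => acc.insert (pvNormKey k) k) PySem.Dict.empty
  pvLoopA lk d keys

-- ===== PORT B =====
-- rank = {}; for i, want in enumerate(keys): nk = _norm_key(want); if nk not in rank: rank[nk] = i
def pvRank (keys : List String) : PySem.Dict String Nat :=
  (keys.zipIdx).foldl (fun acc wi =>
    let nk := pvNormKey wi.1
    if acc.contains nk then acc else acc.insert nk wi.2) PySem.Dict.empty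

-- for k, v in row.items(): i = rank.get(_norm_key(k)); if i is not None: best[i] = v
def pvFill (rank : PySem.Dict String Nat) (items : List (String × Option String))
    (best : List (Option String)) : List (Option String) :=
  items.foldl (fun best kv =>
    match rank.get? (pvNormKey kv.1) with
    | some i => best.set i kv.2
    | none => best) best

-- for v in best: if v is not None: v = str(v).strip(); if v: return v
def pvScan : List (Option String) → Option String
  | [] => none
  | none :: rest => pvScan rest
  | some v :: rest =>
    let v' := PySem.Str.strip v
    if v' ≠ "" then some v' else pvScan rest

def first_present_py_alt (row : List (String × Option String)) (keys : List String) : Option String :=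
  let d : PySem.Dict String (Option String) := PySem.Dict.ofList row
  let best := pvFill (pvRank keys) d.items (List.replicate keys.length none)
  pvScan best

-- ===== PRECONDITION & SPEC =====
def Spec_first_present_py (row : List (String × Option String)) (keys : List String) (out : Option String) : Prop := out = first_present_py_alt row keys
instance (row : List (String × Option String)) (keys : List String) (out : Option String) : Decidable (Spec_first_present_py row keys out) := by unfold Spec_first_present_py; infer_instance

-- ===== CLAIM (what is proved, stated in full; the proofs are below) =====
def Claim_equal_first_present_py : Prop := ∀ (row : List (String × Option String)) (keys : List String), Dom_first_present_py row keys → Spec_first_present_py row keys (first_present_py row keys)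

-- ===== LEMMAS AND PROOFS =====

-- the common reference: value of the LAST row item whose normalized key is w (none = no match or stored None)
def pvG (items : List (String × Option String)) (w : String) : Option String :=
  items.foldl (fun acc kv => if pvNormKey kv.1 = w then kv.2 else acc) none

-- the reference scan: first w in the list whose pvG value strips non-empty
def pvScanG (items : List (String × Option String)) : List String → Option String
  | [] => none
  | w :: ws =>
    match pvG items w with
    | none => pvScanG items ws
    | some v => if PySem.Str.strip v ≠ "" then some (PySem.Str.strip v) else pvScanG items ws

-- A's index lookup is a last-match fold over the keys
theorem pv_get_fold_insert (l : List String) (d : PySem.Dict String String) (w : String) :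
    (l.foldl (fun acc k => acc.insert (pvNormKey k) k) d).get? w
      = l.foldl (fun acc k => if pvNormKey k = w then some k else acc) (d.get? w) := by
  induction l generalizing d with
  | nil => rfl
  | cons k rest ih =>
    rw [List.foldl_cons, List.foldl_cons, ih, PySem.Dict.get?_insert]
    by_cases h : pvNormKey k = w
    · rw [if_pos h.symm, if_pos h]
    · rw [if_neg (fun e => h e.symm), if_neg h]

theorem pv_lastKey_map (items : List (String × Option String)) (w : String)
    (acc : Option (String × Option String)) :
    (items.map Prod.fst).foldl (fun a k => if pvNormKey k = w then some k else a) (acc.map Prod.fst)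
      = (items.foldl (fun a kv => if pvNormKey kv.1 = w then some kv else a) acc).map Prod.fst := by
  induction items generalizing acc with
  | nil => rfl
  | cons kv rest ih =>
    rw [List.map_cons, List.foldl_cons, List.foldl_cons]
    by_cases h : pvNormKey kv.1 = w
    · rw [if_pos h, if_pos h]; exact ih (some kv)
    · rw [if_neg h, if_neg h]; exact ih acc

theorem pv_lastVal (items : List (String × Option String)) (w : String)
    (acc : Option (String × Option String)) :
    items.foldl (fun a kv => if pvNormKey kv.1 = w then kv.2 else a) (acc.elim none Prod.snd)
      = (items.foldl (fun a kv => if pvNormKey kv.1 = w then some kv else a) acc).elim none Prod.snd := by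
  induction items generalizing acc with
  | nil => rfl
  | cons kv rest ih =>
    rw [List.foldl_cons, List.foldl_cons]
    by_cases h : pvNormKey kv.1 = w
    · rw [if_pos h, if_pos h]; exact ih (some kv)
    · rw [if_neg h, if_neg h]; exact ih acc

theorem pvG_eq (items : List (String × Option String)) (w : String) :
    pvG items w
      = (items.foldl (fun a kv => if pvNormKey kv.1 = w then some kv else a) none).elim none Prod.snd :=
  pv_lastVal items w none

theorem pv_lastMatch_mem (w : String) (items : List (String × Option String))
    (acc : Option (String × Option String)) (kv : String × Option String)
    (h : items.foldl (fun a kv => if pvNormKey kv.1 = w then some kv else a) acc = some kv) :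
    acc = some kv ∨ (kv ∈ items ∧ pvNormKey kv.1 = w) := by
  induction items generalizing acc with
  | nil => exact Or.inl h
  | cons kv' rest ih =>
    rw [List.foldl_cons] at h
    rcases ih _ h with h' | h'
    · by_cases hm : pvNormKey kv'.1 = w
      · rw [if_pos hm] at h'
        exact Or.inr ⟨by rw [← Option.some_inj.mp h']; exact List.mem_cons_self, by
          rw [← Option.some_inj.mp h']; exact hm⟩
      · rw [if_neg hm] at h'; exact Or.inl h'
    · exact Or.inr ⟨List.mem_cons_of_mem _ h'.1, h'.2⟩

theorem pvA_key (d : PySem.Dict String (Option String)) (hn : d.keys.Nodup) (w : String) :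
    (d.keys.foldl (fun a k => if pvNormKey k = w then some k else a) none).elim none
        (fun k => d.getD k none)
      = pvG d.items w := by
  have hkeys : d.keys = d.items.map Prod.fst := rfl
  have hmap := pv_lastKey_map d.items w none
  simp only [Option.map_none] at hmap
  rw [hkeys, hmap]
  cases hlm : d.items.foldl (fun a kv => if pvNormKey kv.1 = w then some kv else a) none with
  | none => rw [pvG_eq, hlm]; rfl
  | some kv =>
    rcases pv_lastMatch_mem w d.items none kv hlm with h | h
    · exact absurd h (by simp)
    · have hget : d.getD kv.1 none = kv.2 := PySem.Dict.getD_of_mem_items d h.1 hn none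
      simp only [Option.map_some, Option.elim_some]
      rw [hget, pvG_eq, hlm]
      rfl

theorem pvA_eq_scanG (d : PySem.Dict String (Option String)) (hn : d.keys.Nodup)
    (ks : List String) :
    pvLoopA (d.keys.foldl (fun acc k => acc.insert (pvNormKey k) k) PySem.Dict.empty) d ks
      = pvScanG d.items (ks.map pvNormKey) := by
  induction ks with
  | nil => rfl
  | cons want rest ih =>
    have hget : (d.keys.foldl (fun acc k => acc.insert (pvNormKey k) k) PySem.Dict.empty).get?
        (pvNormKey want)
        = d.keys.foldl (fun a k => if pvNormKey k = (pvNormKey want) then some k else a) none := by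
      rw [pv_get_fold_insert]; rfl
    have hA := pvA_key d hn (pvNormKey want)
    rw [List.map_cons, pvScanG, pvLoopA, hget]
    cases hlk : d.keys.foldl (fun a k => if pvNormKey k = pvNormKey want then some k else a) none with
    | none =>
      rw [hlk] at hA
      simp only [Option.elim_none] at hA
      rw [← hA]
      exact ih
    | some k =>
      rw [hlk] at hA
      simp only [Option.elim_some] at hA
      rw [← hA]
      cases hv : d.getD k none with
      | none => simp only [hv]; exact ih
      | some v =>
        simp only [hv]
        by_cases hs : PySem.Str.strip v ≠ ""
        · rw [if_pos hs, if_pos hs]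
        · rw [if_neg hs, if_neg hs]; exact ih

-- first index of w in a list
def pvFirstIdx (w : String) : List String → Option Nat
  | [] => none
  | x :: xs => if x = w then some 0 else (pvFirstIdx w xs).map (· + 1)

theorem pv_rank_aux (ks : List String) (w : String) :
    ∀ (n : Nat) (acc : PySem.Dict String Nat),
    ((ks.zipIdx n).foldl (fun acc wi =>
        let nk := pvNormKey wi.1
        if acc.contains nk then acc else acc.insert nk wi.2) acc).get? w
      = (acc.get? w).or ((pvFirstIdx w (ks.map pvNormKey)).map (· + n)) := by
  induction ks with
  | nil => intro n acc; simp [pvFirstIdx]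
  | cons k rest ih =>
    intro n acc
    rw [List.zipIdx_cons, List.foldl_cons, List.map_cons]
    have hbeta : (let nk := pvNormKey (k, n).1
        if acc.contains nk then acc else acc.insert nk (k, n).2)
        = if acc.contains (pvNormKey k) then acc else acc.insert (pvNormKey k) n := rfl
    rw [hbeta]
    by_cases hc : acc.contains (pvNormKey k) = true
    · rw [if_pos hc, ih]
      by_cases hw : pvNormKey k = w
      · have hsome : (acc.get? w).isSome := by
          rw [← PySem.Dict.contains_eq_isSome_get?, ← hw]; exact hc
        rcases Option.isSome_iff_exists.mp hsome with ⟨v, hv⟩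
        rw [hv, Option.some_or, Option.some_or]
      · rw [pvFirstIdx, if_neg hw]
        congr 1
        cases pvFirstIdx w (rest.map pvNormKey) with
        | none => rfl
        | some j => simp only [Option.map_some, Option.some_inj]; omega
    · rw [if_neg hc, ih]
      by_cases hw : pvNormKey k = w
      · have hnone : acc.get? w = none := by
          rw [PySem.Dict.get?_eq_none_iff_contains, ← hw]
          simpa using hc
        rw [PySem.Dict.get?_insert, if_pos hw.symm, hnone, pvFirstIdx, if_pos hw,
          Option.some_or, Option.none_or, Option.map_some]
        simp
      · rw [PySem.Dict.get?_insert, if_neg (fun e => hw e.symm), pvFirstIdx, if_neg hw]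
        congr 1
        cases pvFirstIdx w (rest.map pvNormKey) with
        | none => rfl
        | some j => simp only [Option.map_some, Option.some_inj]; omega

theorem pv_rank_char (keys : List String) (w : String) :
    (pvRank keys).get? w = pvFirstIdx w (keys.map pvNormKey) := by
  rw [pvRank, pv_rank_aux, PySem.Dict.get?_empty]
  cases pvFirstIdx w (keys.map pvNormKey) with
  | none => rfl
  | some j => simp

theorem pv_firstIdx_sound (w : String) (l : List String) :
    ∀ (i : Nat), pvFirstIdx w l = some i → l[i]? = some w := by
  induction l with
  | nil => intro i h; simp [pvFirstIdx] at h
  | cons x xs ih =>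
    intro i h
    rw [pvFirstIdx] at h
    by_cases hx : x = w
    · rw [if_pos hx] at h
      cases Option.some_inj.mp h
      simp [hx]
    · rw [if_neg hx] at h
      rcases Option.map_eq_some_iff.mp h with ⟨j, hj, hij⟩
      subst hij
      simpa using ih j hj

theorem pv_firstIdx_iff (w : String) (l : List String) :
    ∀ (i : Nat), l[i]? = some w → (pvFirstIdx w l = some i ↔ w ∉ l.take i) := by
  induction l with
  | nil => intro i h; simp at h
  | cons x xs ih =>
    intro i h
    cases i with
    | zero =>
      simp at h
      subst h
      simp [pvFirstIdx]
    | succ i =>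
      simp at h
      by_cases hx : x = w
      · rw [pvFirstIdx, if_pos hx, List.take_succ_cons]
        constructor
        · intro he
          exact absurd (Option.some_inj.mp he) (by omega)
        · intro hni
          have hmem : w ∈ x :: xs.take i := by rw [hx]; exact List.mem_cons_self
          exact absurd hmem hni
      · rw [pvFirstIdx, if_neg hx, List.take_succ_cons, List.mem_cons]
        have hiff := ih i h
        constructor
        · intro he hmem
          rcases Option.map_eq_some_iff.mp he with ⟨j, hj, hij⟩
          have hji : j = i := by omega
          subst hji
          rcases hmem with h1 | h2
          · exact hx h1.symm
          · exact (hiff.mp hj) h2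
        · intro hni
          rw [hiff.mpr (fun hm => hni (Or.inr hm))]
          rfl

-- masked reference list: per position, none if the (normalized) key was seen before, else its pvG value
def pvMask (items : List (String × Option String)) : List String → List String → List (Option String)
  | _, [] => []
  | seen, w :: ws => (if w ∈ seen then none else pvG items w) :: pvMask items (w :: seen) ws

theorem pv_mask_length (items : List (String × Option String)) (ws : List String) :
    ∀ (seen : List String), (pvMask items seen ws).length = ws.length := by
  induction ws with
  | nil => intro seen; rfl
  | cons w ws ih => intro seen; rw [pvMask]; simp [ih]

theorem pv_mask_char (items : List (String × Option String)) (ws : List String) :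
    ∀ (seen : List String) (i : Nat) (w : String), ws[i]? = some w →
    (pvMask items seen ws)[i]? = some (if (w ∈ seen ∨ w ∈ ws.take i) then none else pvG items w) := by
  induction ws with
  | nil => intro seen i w h; simp at h
  | cons w' ws ih =>
    intro seen i w h
    cases i with
    | zero =>
      simp at h
      subst h
      simp [pvMask]
    | succ i =>
      simp at h
      rw [pvMask, List.getElem?_cons_succ, ih (w' :: seen) i w h]
      congr 1
      have hiff : (w ∈ w' :: seen ∨ w ∈ ws.take i) ↔ (w ∈ seen ∨ w ∈ (w' :: ws).take (i+1)) := by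
        rw [List.take_succ_cons]
        simp only [List.mem_cons]
        tauto
      rw [if_congr hiff rfl rfl]

theorem pv_fill_step (rank : PySem.Dict String Nat) (items : List (String × Option String))
    (kv : String × Option String) (b : List (Option String)) :
    pvFill rank (items ++ [kv]) b
      = (match rank.get? (pvNormKey kv.1) with
         | some i => (pvFill rank items b).set i kv.2
         | none => pvFill rank items b) := by
  rw [pvFill, List.foldl_append]
  rfl

theorem pv_fill_length (rank : PySem.Dict String Nat) (items : List (String × Option String)) :
    ∀ (b : List (Option String)), (pvFill rank items b).length = b.length := by
  induction items with
  | nil => intro b; rfl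
  | cons kv rest ih =>
    intro b
    have hstep : pvFill rank (kv :: rest) b
        = pvFill rank rest (match rank.get? (pvNormKey kv.1) with
            | some i => b.set i kv.2
            | none => b) := rfl
    rw [hstep]
    cases h : rank.get? (pvNormKey kv.1) with
    | none => simp only [h]; exact ih b
    | some i => simp only [h]; rw [ih, List.length_set]

theorem pv_fill_char (keys : List String) (items : List (String × Option String))
    (i : Nat) (w : String) (hw : (keys.map pvNormKey)[i]? = some w) :
    (pvFill (pvRank keys) items (List.replicate keys.length none))[i]?
      = some (if pvFirstIdx w (keys.map pvNormKey) = some i then pvG items w else none) := by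
  have hi : i < keys.length := by
    rcases List.getElem?_eq_some_iff.mp hw with ⟨hlt, _⟩
    simpa using hlt
  induction items using List.reverseRecOn with
  | nil =>
    rw [show pvFill (pvRank keys) [] (List.replicate keys.length none)
        = List.replicate keys.length none from rfl]
    rw [List.getElem?_replicate, if_pos hi]
    simp [pvG]
  | append_singleton items kv ih =>
    rw [pv_fill_step, pv_rank_char]
    have hGapp : pvG (items ++ [kv]) w
        = if pvNormKey kv.1 = w then kv.2 else pvG items w := by
      rw [pvG, List.foldl_append, List.foldl_cons, List.foldl_nil, pvG]
    by_cases h1 : pvNormKey kv.1 = w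
    · rw [h1]
      cases hf : pvFirstIdx w (keys.map pvNormKey) with
      | none =>
        simp only [hf]
        rw [ih]
        simp [hf]
      | some j =>
        simp only [hf]
        by_cases hj : j = i
        · subst hj
          rw [List.getElem?_set, if_pos rfl,
            if_pos (by rw [pv_fill_length, List.length_replicate]; exact hi)]
          rw [if_pos rfl, hGapp, if_pos h1]
        · rw [List.getElem?_set, if_neg hj, ih, hf]
          simp [hj]
    · have hGsame : pvG (items ++ [kv]) w = pvG items w := by rw [hGapp, if_neg h1]
      rw [hGsame]
      cases hf : pvFirstIdx (pvNormKey kv.1) (keys.map pvNormKey) with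
      | none => simp only [hf]; exact ih
      | some j =>
        have hji : j ≠ i := by
          intro he
          subst he
          have hs := pv_firstIdx_sound _ _ _ hf
          rw [hw] at hs
          exact h1 (Option.some_inj.mp hs).symm
        simp only [hf]
        rw [List.getElem?_set, if_neg hji]
        exact ih

theorem pv_fill_eq_mask (keys : List String) (items : List (String × Option String)) :
    pvFill (pvRank keys) items (List.replicate keys.length none)
      = pvMask items [] (keys.map pvNormKey) := by
  apply List.ext_getElem?
  intro i
  cases hw : (keys.map pvNormKey)[i]? with
  | none =>
    have hi : keys.length ≤ i := by
      by_contra hcon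
      push_neg at hcon
      rw [List.getElem?_eq_getElem (by simpa using hcon)] at hw
      simp at hw
    rw [List.getElem?_eq_none (by rw [pv_fill_length, List.length_replicate]; exact hi),
      List.getElem?_eq_none (by rw [pv_mask_length]; simpa using hi)]
  | some w =>
    rw [pv_fill_char keys items i w hw, pv_mask_char items _ [] i w hw]
    have hiff := pv_firstIdx_iff w (keys.map pvNormKey) i hw
    by_cases hm : w ∈ (keys.map pvNormKey).take i
    · rw [if_neg (fun he => (hiff.mp he) hm), if_pos (by simp [hm])]
    · rw [if_pos (hiff.mpr hm), if_neg (by simp [hm])]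

theorem pv_scan_mask (items : List (String × Option String)) (ws : List String) :
    ∀ (seen : List String),
      (∀ w ∈ seen, ∀ v, pvG items w = some v → PySem.Str.strip v = "") →
      pvScan (pvMask items seen ws) = pvScanG items ws := by
  induction ws with
  | nil => intro seen _; rfl
  | cons w ws ih =>
    intro seen hseen
    rw [pvMask, pvScanG]
    cases hv : pvG items w with
    | none =>
      simp only [hv, ite_self]
      have hred : pvScan (none :: pvMask items (w :: seen) ws)
          = pvScan (pvMask items (w :: seen) ws) := rfl
      rw [hred]
      exact ih (w :: seen) (by
        intro x hx v hv'
        rcases List.mem_cons.mp hx with hh | hh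
        · subst hh; rw [hv] at hv'; simp at hv'
        · exact hseen x hh v hv')
    | some v =>
      simp only [hv]
      by_cases hw : w ∈ seen
      · rw [if_pos hw]
        have hst : PySem.Str.strip v = "" := hseen w hw v hv
        rw [if_neg (by simpa using hst)]
        have hred : pvScan (none :: pvMask items (w :: seen) ws)
            = pvScan (pvMask items (w :: seen) ws) := rfl
        rw [hred]
        exact ih (w :: seen) (by
          intro x hx v' hv'
          rcases List.mem_cons.mp hx with hh | hh
          · subst hh; rw [hv] at hv'; cases hv'; exact hst
          · exact hseen x hh v' hv')
      · rw [if_neg hw]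
        have hred : pvScan (some v :: pvMask items (w :: seen) ws)
            = if PySem.Str.strip v ≠ "" then some (PySem.Str.strip v)
              else pvScan (pvMask items (w :: seen) ws) := rfl
        rw [hred]
        by_cases hs : PySem.Str.strip v ≠ ""
        · rw [if_pos hs, if_pos hs]
        · rw [if_neg hs, if_neg hs]
          exact ih (w :: seen) (by
            intro x hx v' hv'
            rcases List.mem_cons.mp hx with hh | hh
            · subst hh; rw [hv] at hv'; cases hv'; simpa using hs
            · exact hseen x hh v' hv')

-- ===== VERDICT (by name: the statement is the Claim_ definition above) =====
theorem first_present_py_spec : Claim_equal_first_present_py := by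
  intro row keys _
  unfold Spec_first_present_py first_present_py first_present_py_alt
  have hn : (PySem.Dict.ofList row).keys.Nodup := PySem.Dict.nodup_keys_ofList row
  rw [pvA_eq_scanG _ hn]
  show pvScanG (PySem.Dict.ofList row).items (List.map pvNormKey keys)
    = pvScan (pvFill (pvRank keys) (PySem.Dict.ofList row).items
        (List.replicate keys.length none))
  rw [pv_fill_eq_mask]
  exact (pv_scan_mask _ _ [] (by intro w hw; exact absurd hw (List.not_mem_nil))).symm
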